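-- pv_equiv track=rewrite | github.com/ViktorWase/Cgpy | cgp.py | get_gene_max_values
-- ===== SOURCE A (Python) =====
-- def get_gene_max_values(dims, nr_of_parameters, len_of_op_table, nr_of_nodes, nodes_per_layer=1):
-- 	"""
-- 	A gene is a list of n ints, that define the CGP. Each such number has
-- 	a minimum value, and a maximum value. The minimum value is always zero.
-- 	This function will return a list of the n maximum values.
-- 	"""
-- 	# Check the inputdata
-- 	assert nodes_per_layer >= 1
-- 	assert nr_of_nodes > 0
-- 	assert dims > 0
-- 	assert nr_of_parameters >= 0
--
-- 	# The number of nodes has to be divisible by nodes_per_layer.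
-- 	# Otherwise the number of layers won't be an int, and that is strange.
-- 	assert nr_of_nodes%nodes_per_layer == 0
--
-- 	dim_and_pars = dims + nr_of_parameters
--
-- 	# Each node has 3 ints: the two inputs and the operation.
-- 	len_of_gene = nr_of_nodes*3 + 1
-- 	max_vals = [None]*len_of_gene
--
-- 	layer = 0
-- 	for node_count in range(nr_of_nodes):
-- 		nr_of_nodes_and_inputs_of_all_prev_layers = layer*nodes_per_layer + dim_and_pars
--
-- 		max_vals[3*node_count+2] = nr_of_nodes_and_inputs_of_all_prev_layers - 1
-- 		max_vals[3*node_count+1] = nr_of_nodes_and_inputs_of_all_prev_layers - 1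
-- 		max_vals[3*node_count] = len_of_op_table-1
--
-- 		if node_count%nodes_per_layer == nodes_per_layer-1:
-- 			layer += 1
--
-- 	# The last int of the gene just points to one of the inputs, parameters or nodes and
-- 	# calls it the outout.
-- 	max_vals[-1] = dim_and_pars + nr_of_nodes - 1
-- 	return max_vals
-- ===== SOURCE B (Python) =====
-- def get_gene_max_values(dims, nr_of_parameters, len_of_op_table, nr_of_nodes, nodes_per_layer=1):
-- 	"""
-- 	A gene is a list of n ints, that define the CGP. Each such number has
-- 	a minimum value, and a maximum value. The minimum value is always zero.
-- 	This function will return a list of the n maximum values.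
-- 	"""
-- 	# Check the inputdata
-- 	assert nodes_per_layer >= 1
-- 	assert nr_of_nodes > 0
-- 	assert dims > 0
-- 	assert nr_of_parameters >= 0
--
-- 	# The number of nodes has to be divisible by nodes_per_layer.
-- 	# Otherwise the number of layers won't be an int, and that is strange.
-- 	assert nr_of_nodes%nodes_per_layer == 0
--
-- 	dim_and_pars = dims + nr_of_parameters
-- 	nr_of_layers = nr_of_nodes//nodes_per_layer
--
-- 	# Build the gene layer by layer: every node of a layer shares the same
-- 	# input bound, so compute it once per layer and emit the three ints
-- 	# (operation, input, input) for each node in that layer.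
-- 	max_vals = []
-- 	for layer in range(nr_of_layers):
-- 		bound = layer*nodes_per_layer + dim_and_pars - 1
-- 		for _ in range(nodes_per_layer):
-- 			max_vals.extend([len_of_op_table - 1, bound, bound])
--
-- 	# The last int points to one of the inputs, parameters or nodes (the output).
-- 	max_vals.append(dim_and_pars + nr_of_nodes - 1)
-- 	return max_vals
-- ===== Notes on version B (the rewrite author's own statement) =====
-- stated objective: alternative
-- what changed: Replaces the flat node loop with its running layer counter and %-triggered increment by a nested layers/nodes-per-layer iteration that computes the shared bound once per layer and appends each node's triple, instead of preallocating a None list and writing slots by index.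
import Mathlib
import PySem

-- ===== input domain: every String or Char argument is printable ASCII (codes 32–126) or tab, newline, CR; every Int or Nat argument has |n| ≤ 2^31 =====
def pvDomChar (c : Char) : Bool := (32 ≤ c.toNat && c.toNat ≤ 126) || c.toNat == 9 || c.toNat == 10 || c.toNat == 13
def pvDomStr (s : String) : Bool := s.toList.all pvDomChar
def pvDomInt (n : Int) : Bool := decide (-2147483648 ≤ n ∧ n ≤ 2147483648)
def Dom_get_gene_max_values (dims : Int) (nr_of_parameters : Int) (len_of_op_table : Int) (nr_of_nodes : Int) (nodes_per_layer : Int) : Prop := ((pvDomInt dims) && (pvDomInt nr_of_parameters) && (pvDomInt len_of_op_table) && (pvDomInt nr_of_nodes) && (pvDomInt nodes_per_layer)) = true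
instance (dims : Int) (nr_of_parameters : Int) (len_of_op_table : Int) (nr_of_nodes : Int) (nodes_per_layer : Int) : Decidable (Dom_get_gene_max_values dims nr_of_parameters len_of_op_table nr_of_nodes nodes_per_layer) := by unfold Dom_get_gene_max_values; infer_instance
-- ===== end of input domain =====

-- ===== PORT A =====
-- B replaces A's flat node loop (running layer counter, %-triggered increment, writes into a
-- preallocated list) by nested layer/node loops that append each node's triple (objective: alternative).
-- the body of A's for-loop, factored as a named helper (verbatim the Python loop body)
def pvStepA (dim_and_pars len_of_op_table nodes_per_layer : Int) (st : List Int × Int) (node_count : Int) : List Int × Int :=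
  let nr_prev := st.2 * nodes_per_layer + dim_and_pars
  let mv := st.1.set (3 * node_count + 2).toNat (nr_prev - 1)
  let mv := mv.set (3 * node_count + 1).toNat (nr_prev - 1)
  let mv := mv.set (3 * node_count).toNat (len_of_op_table - 1)
  if PySem.Int.mod node_count nodes_per_layer = nodes_per_layer - 1 then (mv, st.2 + 1) else (mv, st.2)

def get_gene_max_values (dims : Int) (nr_of_parameters : Int) (len_of_op_table : Int) (nr_of_nodes : Int) (nodes_per_layer : Int) : List Int :=
  let dim_and_pars := dims + nr_of_parameters
  let len_of_gene := nr_of_nodes * 3 + 1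
  -- max_vals = [None]*len_of_gene : 0 stands for Python's None placeholder; on Pre_ every slot is overwritten
  let max_vals : List Int := List.replicate len_of_gene.toNat 0
  let st := (PySem.List.pyRange 0 nr_of_nodes 1).foldl (pvStepA dim_and_pars len_of_op_table nodes_per_layer) (max_vals, 0)
  -- max_vals[-1] = … : on Pre_ the list is nonempty, so index -1 is position length-1
  st.1.set (st.1.length - 1) (dim_and_pars + nr_of_nodes - 1)

-- ===== PORT B =====
def get_gene_max_values_alt (dims : Int) (nr_of_parameters : Int) (len_of_op_table : Int) (nr_of_nodes : Int) (nodes_per_layer : Int) : List Int :=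
  let dim_and_pars := dims + nr_of_parameters
  let nr_of_layers := PySem.Int.floordiv nr_of_nodes nodes_per_layer
  let max_vals := (PySem.List.pyRange 0 nr_of_layers 1).foldl
    (fun acc layer =>
      let bound := layer * nodes_per_layer + dim_and_pars - 1
      (PySem.List.pyRange 0 nodes_per_layer 1).foldl
        (fun acc2 _ => acc2 ++ [len_of_op_table - 1, bound, bound]) acc)
    []
  max_vals ++ [dim_and_pars + nr_of_nodes - 1]

-- ===== PRECONDITION & SPEC =====
-- Pre_ excludes exactly the inputs on which A's assert statements raise AssertionError.
def Pre_get_gene_max_values (dims : Int) (nr_of_parameters : Int) (len_of_op_table : Int) (nr_of_nodes : Int) (nodes_per_layer : Int) : Prop :=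
  1 ≤ nodes_per_layer ∧ 0 < nr_of_nodes ∧ 0 < dims ∧ 0 ≤ nr_of_parameters ∧
    PySem.Int.mod nr_of_nodes nodes_per_layer = 0
instance (dims : Int) (nr_of_parameters : Int) (len_of_op_table : Int) (nr_of_nodes : Int) (nodes_per_layer : Int) : Decidable (Pre_get_gene_max_values dims nr_of_parameters len_of_op_table nr_of_nodes nodes_per_layer) := by unfold Pre_get_gene_max_values; infer_instance
def pvWitness_get_gene_max_values : Int × Int × Int × Int × Int := (1, 0, 4, 2, 2)

def Spec_get_gene_max_values (dims : Int) (nr_of_parameters : Int) (len_of_op_table : Int) (nr_of_nodes : Int) (nodes_per_layer : Int) (out : List Int) : Prop := out = get_gene_max_values_alt dims nr_of_parameters len_of_op_table nr_of_nodes nodes_per_layer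
instance (dims : Int) (nr_of_parameters : Int) (len_of_op_table : Int) (nr_of_nodes : Int) (nodes_per_layer : Int) (out : List Int) : Decidable (Spec_get_gene_max_values dims nr_of_parameters len_of_op_table nr_of_nodes nodes_per_layer out) := by unfold Spec_get_gene_max_values; infer_instance

-- ===== CLAIM (what is proved, stated in full; the proofs are below) =====
def Claim_equal_get_gene_max_values : Prop := ∀ (dims : Int) (nr_of_parameters : Int) (len_of_op_table : Int) (nr_of_nodes : Int) (nodes_per_layer : Int), Dom_get_gene_max_values dims nr_of_parameters len_of_op_table nr_of_nodes nodes_per_layer → Pre_get_gene_max_values dims nr_of_parameters len_of_op_table nr_of_nodes nodes_per_layer → Spec_get_gene_max_values dims nr_of_parameters len_of_op_table nr_of_nodes nodes_per_layer (get_gene_max_values dims nr_of_parameters len_of_op_table nr_of_nodes nodes_per_layer)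

-- ===== LEMMAS AND PROOFS =====

-- The per-node triple both programs emit: operation bound, then the two input bounds.
def pvTriple (t b : Int) : List Int := [t, b, b]

-- The flat node prefix A's loop builds: node j (in layer j/P) gets input bound (j/P)*npl + dp - 1.
def pvPrefA (t dp npl : Int) (P : Nat) (k : Nat) : List Int :=
  (List.range k).flatMap (fun j => pvTriple t (((j / P : Nat) : Int) * npl + dp - 1))

theorem pv_succ_div (P k : Nat) (hP : 0 < P) :
    (k + 1) / P = k / P + (if k % P = P - 1 then 1 else 0) := by
  rw [Nat.succ_div]
  have hlt : k % P < P := Nat.mod_lt _ hP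
  have hdm := Nat.div_add_mod k P
  have key : P ∣ k + 1 ↔ k % P = P - 1 := by
    constructor
    · rintro ⟨c, hc⟩
      by_contra h
      have h1 : (k % P + 1 + P * (k / P)) % P = (k % P + 1) % P := Nat.add_mul_mod_self_left _ _ _
      have e : k % P + 1 + P * (k / P) = k + 1 := by omega
      rw [e] at h1
      have h2 : (k % P + 1) % P = k % P + 1 := Nat.mod_eq_of_lt (by omega)
      have h0 : (k + 1) % P = 0 := by rw [hc]; simp
      omega
    · intro h
      refine ⟨k / P + 1, ?_⟩
      rw [Nat.mul_succ]; omega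
  simp [key]

theorem pvPrefA_length (t dp npl : Int) (P k : Nat) :
    (pvPrefA t dp npl P k).length = 3 * k := by
  induction k with
  | zero => simp [pvPrefA]
  | succ k ih =>
    unfold pvPrefA at *
    rw [List.range_succ, List.flatMap_append]
    simp [pvTriple] at *
    omega

-- Three consecutive list writes at offsets n, n+1, n+2 past an n-element prefix.
theorem pv_set3 (pref rest : List Int) (n : Nat) (h : pref.length = n) (a b c : Int) :
    (((pref ++ (0 :: 0 :: 0 :: rest)).set (n + 2) c).set (n + 1) b).set n a
      = pref ++ (a :: b :: c :: rest) := by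
  have e2 : (pref ++ (0 :: 0 :: 0 :: rest)).set (n + 2) c = pref ++ (0 :: 0 :: c :: rest) := by
    rw [List.set_append, if_neg (by omega)]
    have e : n + 2 - pref.length = 2 := by omega
    rw [e]; rfl
  have e1 : (pref ++ ((0:Int) :: 0 :: c :: rest)).set (n + 1) b = pref ++ (0 :: b :: c :: rest) := by
    rw [List.set_append, if_neg (by omega)]
    have e : n + 1 - pref.length = 1 := by omega
    rw [e]; rfl
  have e0 : (pref ++ ((0:Int) :: b :: c :: rest)).set n a = pref ++ (a :: b :: c :: rest) := by
    rw [List.set_append, if_neg (by omega)]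
    have e : n - pref.length = 0 := by omega
    rw [e]; rfl
  rw [e2, e1, e0]

-- A's loop invariant: after k of N iterations the list is the k-node prefix followed by the
-- untouched placeholder slots, and the layer counter equals k/P.
theorem pv_aloop (lop dp npl : Int) (P N : Nat) (hnpl : npl = (P : Int)) (hP : 0 < P) :
    ∀ k, k ≤ N →
      (List.range k).foldl (fun st (j : Nat) => pvStepA dp lop npl st (j : Int))
        (List.replicate (3 * N + 1) 0, 0)
      = (pvPrefA (lop - 1) dp npl P k ++ List.replicate (3 * (N - k) + 1) 0, ((k / P : Nat) : Int)) := by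
  intro k
  induction k with
  | zero => intro _; simp [pvPrefA]
  | succ k ih =>
    intro hk
    rw [List.range_succ, List.foldl_append, ih (by omega)]
    simp only [List.foldl_cons, List.foldl_nil, pvStepA]
    have hidx0 : (3 * (k : Int)).toNat = 3 * k := by omega
    have hidx1 : (3 * (k : Int) + 1).toNat = 3 * k + 1 := by omega
    have hidx2 : (3 * (k : Int) + 2).toNat = 3 * k + 2 := by omega
    have hlen : (pvPrefA (lop - 1) dp npl P k).length = 3 * k := pvPrefA_length (lop - 1) dp npl P k
    have hrep : List.replicate (3 * (N - k) + 1) (0 : Int)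
        = 0 :: 0 :: 0 :: List.replicate (3 * (N - (k + 1)) + 1) 0 := by
      have e : 3 * (N - k) + 1 = (((3 * (N - (k + 1)) + 1) + 1) + 1) + 1 := by omega
      rw [e]; simp [List.replicate_succ]
    have hmod : PySem.Int.mod (k : Int) npl = ((k % P : Nat) : Int) := by
      rw [hnpl]; exact PySem.Int.mod_natCast k P
    have hpref : pvPrefA (lop - 1) dp npl P (k + 1)
        = pvPrefA (lop - 1) dp npl P k ++ pvTriple (lop - 1) (((k / P : Nat) : Int) * npl + dp - 1) := by
      unfold pvPrefA; rw [List.range_succ, List.flatMap_append]; simp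
    rw [hrep, hidx0, hidx1, hidx2,
        pv_set3 _ _ _ hlen (lop - 1) (((k / P : Nat) : Int) * npl + dp - 1) (((k / P : Nat) : Int) * npl + dp - 1)]
    have hcond : (PySem.Int.mod (k : Int) npl = npl - 1) ↔ (k % P = P - 1) := by
      rw [hmod, hnpl]; omega
    have hdiv := pv_succ_div P k hP
    by_cases hc : k % P = P - 1
    · rw [if_pos (hcond.mpr hc)]
      have : (k + 1) / P = k / P + 1 := by rw [hdiv, if_pos hc]
      rw [this]
      simp [hpref, pvTriple]
    · rw [if_neg (fun hx => hc (hcond.mp hx))]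
      have : (k + 1) / P = k / P := by rw [hdiv, if_neg hc]; omega
      rw [this]
      simp [hpref, pvTriple]

-- Regrouping the flat prefix by layers: N = L*P nodes are L layers of P constant triples.
theorem pv_regroup (t dp npl : Int) (P L : Nat) (hP : 0 < P) :
    pvPrefA t dp npl P (L * P)
      = (List.range L).flatMap
          (fun (l : Nat) => (List.range P).flatMap (fun _ => pvTriple t ((l : Int) * npl + dp - 1))) := by
  induction L with
  | zero => simp [pvPrefA]
  | succ L ih =>
    have e : (L + 1) * P = L * P + P := by ring
    rw [e]
    unfold pvPrefA at *
    rw [List.range_add, List.flatMap_append, ih, List.range_succ, List.flatMap_append]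
    congr 1
    rw [List.flatMap_map]
    simp only [List.flatMap_cons, List.flatMap_nil, List.append_nil]
    refine List.flatMap_congr (fun i hi => ?_)
    have hiP : i < P := List.mem_range.mp hi
    have hdiv : (L * P + i) / P = L := by
      rw [Nat.mul_comm L P, Nat.mul_add_div hP, Nat.div_eq_of_lt hiP]; omega
    rw [hdiv]

-- The two ports agree on every input A's asserts admit.
theorem pv_main (dims nr_of_parameters len_of_op_table nr_of_nodes nodes_per_layer : Int)
    (h1 : 1 ≤ nodes_per_layer) (h2 : 0 < nr_of_nodes)
    (h5 : PySem.Int.mod nr_of_nodes nodes_per_layer = 0) :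
    get_gene_max_values dims nr_of_parameters len_of_op_table nr_of_nodes nodes_per_layer
      = get_gene_max_values_alt dims nr_of_parameters len_of_op_table nr_of_nodes nodes_per_layer := by
  obtain ⟨N, hN⟩ : ∃ N : Nat, nr_of_nodes = (N : Int) := ⟨nr_of_nodes.toNat, by omega⟩
  obtain ⟨P, hP⟩ : ∃ P : Nat, nodes_per_layer = (P : Int) := ⟨nodes_per_layer.toNat, by omega⟩
  have hPpos : 0 < P := by omega
  have hNpos : 0 < N := by omega
  have hdvd : P ∣ N := by
    have := (PySem.Int.mod_eq_zero_iff_dvd nr_of_nodes nodes_per_layer).mp h5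
    subst hN hP
    exact_mod_cast this
  obtain ⟨L, hLP⟩ : ∃ L : Nat, N = L * P := ⟨N / P, by rw [Nat.div_mul_cancel hdvd]⟩
  subst hN hP
  -- ===== A side =====
  unfold get_gene_max_values
  simp only []
  rw [PySem.List.pyRange_one]
  have e1 : ((N : Int) - 0).toNat = N := by omega
  rw [e1, List.foldl_map]
  simp only [zero_add]
  have e3 : ((N : Int) * 3 + 1).toNat = 3 * N + 1 := by omega
  rw [e3, pv_aloop len_of_op_table (dims + nr_of_parameters) (P : Int) P N rfl hPpos N le_rfl]
  have hlenp := pvPrefA_length (len_of_op_table - 1) (dims + nr_of_parameters) (P : Int) P N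
  have e4 : 3 * (N - N) + 1 = 1 := by omega
  rw [e4]
  have e5 : (pvPrefA (len_of_op_table - 1) (dims + nr_of_parameters) (P : Int) P N
        ++ List.replicate 1 (0 : Int)).set
        ((pvPrefA (len_of_op_table - 1) (dims + nr_of_parameters) (P : Int) P N
          ++ List.replicate 1 (0 : Int)).length - 1) (dims + nr_of_parameters + (N : Int) - 1)
      = pvPrefA (len_of_op_table - 1) (dims + nr_of_parameters) (P : Int) P N
          ++ [dims + nr_of_parameters + (N : Int) - 1] := by
    rw [List.set_append, if_neg (by simp [hlenp])]
    congr 1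
    simp [hlenp]
  rw [e5]
  -- ===== B side =====
  unfold get_gene_max_values_alt
  simp only []
  have e6 : PySem.Int.floordiv (N : Int) (P : Int) = ((N / P : Nat) : Int) :=
    PySem.Int.floordiv_natCast N P
  have e7 : N / P = L := by rw [hLP, Nat.mul_div_cancel _ hPpos]
  rw [e6, e7]
  have houter : (fun (acc : List Int) (layer : Int) =>
      (PySem.List.pyRange 0 (P : Int) 1).foldl
        (fun acc2 _ => acc2 ++ [len_of_op_table - 1,
          layer * (P : Int) + (dims + nr_of_parameters) - 1,
          layer * (P : Int) + (dims + nr_of_parameters) - 1]) acc)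
      = fun acc layer => acc ++ (List.range P).flatMap
          (fun _ => pvTriple (len_of_op_table - 1) (layer * (P : Int) + (dims + nr_of_parameters) - 1)) := by
    funext acc layer
    rw [PySem.List.foldl_append_eq_flatMap]
    congr 1
    rw [PySem.List.pyRange_one]
    have eP : ((P : Int) - 0).toNat = P := by omega
    rw [eP, List.flatMap_map]
    simp [pvTriple]
  rw [houter, PySem.List.foldl_append_eq_flatMap, List.nil_append]
  congr 1
  rw [PySem.List.pyRange_one 0 (L : Int)]
  have e8 : ((L : Int) - 0).toNat = L := by omega
  rw [e8, List.flatMap_map]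
  simp only [zero_add]
  rw [hLP, pv_regroup (len_of_op_table - 1) (dims + nr_of_parameters) (P : Int) P L hPpos]

-- ===== VERDICT (by name: the statement is the Claim_ definition above) =====
theorem get_gene_max_values_spec : Claim_equal_get_gene_max_values := by
  intro dims nr_of_parameters len_of_op_table nr_of_nodes nodes_per_layer _hdom hpre
  obtain ⟨h1, h2, _h3, _h4, h5⟩ := hpre
  unfold Spec_get_gene_max_values
  exact pv_main dims nr_of_parameters len_of_op_table nr_of_nodes nodes_per_layer h1 h2 h5
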